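-- pv_equiv track=rewrite | github.com/hansroh/aquests | aquests/lib/dnn/multimedia/silence_detection.py | false_count
-- ===== SOURCE A (Python) =====
-- def false_count(detection):
--     # Input is the list of Boolean data.
--     # It returns starting window of silent interval and how long it lasts.
--     # For example if in put is [T T T F F F F T T F F T T F], then it returns
--     # [[3,4],[9,2],[13,1]]
--     i = 0
--     detect_list = []
--     while i < len(detection):
--         if detection[i] == True:
--             i += 1
--         else:
--             j = 0
--             while (i + j) < len(detection) and detection[i + j] == False:
--                 j += 1
--             detect_list.append((i, j))
--             i += j
--     return detect_list
-- ===== SOURCE B (Python) =====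
-- def false_count(detection):
--     # Boundary detection: a False run starts at i where detection[i] is False and
--     # the previous element is True (or i == 0); it ends at the last False before a
--     # True (or the list end). Pair the k-th start with the k-th end.
--     n = len(detection)
--     starts = [i for i in range(n) if not detection[i] and (i == 0 or detection[i - 1])]
--     ends = [i for i in range(n) if not detection[i] and (i == n - 1 or detection[i + 1])]
--     return [(s, e + 1 - s) for s, e in zip(starts, ends)]
-- ===== Notes on version B (the rewrite author's own statement) =====
-- stated objective: alternative
-- what changed: Replaced the stateful nested index/while run scan with run-boundary detection: two comprehensions collect the start and end indices of False runs by comparing each element with its neighbour, and zip pairs them into (start, length) tuples.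
import Mathlib
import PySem

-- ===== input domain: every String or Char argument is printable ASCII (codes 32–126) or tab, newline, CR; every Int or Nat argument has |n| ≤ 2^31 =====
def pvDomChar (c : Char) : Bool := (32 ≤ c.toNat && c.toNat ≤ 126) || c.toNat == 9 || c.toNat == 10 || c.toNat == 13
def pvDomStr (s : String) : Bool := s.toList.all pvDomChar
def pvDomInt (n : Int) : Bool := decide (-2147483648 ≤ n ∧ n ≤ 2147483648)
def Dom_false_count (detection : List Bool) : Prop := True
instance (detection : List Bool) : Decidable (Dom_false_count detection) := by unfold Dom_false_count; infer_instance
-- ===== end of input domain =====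

-- B replaces A's stateful nested index/while run scan by run-BOUNDARY detection:
-- two filtered index lists (run starts, run ends) paired by zip; same O(n) cost,
-- a different algorithm (neighbour comparison instead of a scanning state machine).

-- ===== PORT A =====
-- inner `while (i + j) < len(detection) and detection[i + j] == False: j += 1`;
-- `fuel` only bounds the iteration count (fuel = len(detection) is always enough), it
-- changes no computed value
def fcInner (d : List Bool) (i j fuel : Nat) : Nat :=
  match fuel with
  | 0 => j
  | f + 1 =>
    if i + j < d.length then
      if d.getD (i + j) false = false then fcInner d i (j + 1) f else j
    else j

-- outer `while i < len(detection)` loop, carrying `detect_list` as `acc`; fuel as above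
def fcLoop (d : List Bool) (fuel i : Nat) (acc : List (Int × Int)) : List (Int × Int) :=
  match fuel with
  | 0 => acc
  | f + 1 =>
    if i < d.length then
      if d.getD i false = true then fcLoop d f (i + 1) acc
      else
        let j := fcInner d i 0 d.length
        fcLoop d f (i + j) (acc ++ [((i : Int), (j : Int))])
    else acc

def false_count (detection : List Bool) : List (Int × Int) :=
  fcLoop detection detection.length 0 []

-- ===== PORT B =====
-- `starts = [i for i in range(n) if not detection[i] and (i == 0 or detection[i-1])]`,
-- `ends   = [i for i in range(n) if not detection[i] and (i == n-1 or detection[i+1])]`,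
-- `[(s, e + 1 - s) for s, e in zip(starts, ends)]`; the guarded indices i-1 / i+1 are
-- always in range when read (short-circuit), so getD is exact
def false_count_alt (detection : List Bool) : List (Int × Int) :=
  let n := detection.length
  let starts := (List.range n).filter
    (fun i => !(detection.getD i false) && ((i == 0) || detection.getD (i - 1) false))
  let ends := (List.range n).filter
    (fun i => !(detection.getD i false) && ((i == n - 1) || detection.getD (i + 1) false))
  (starts.zip ends).map (fun p => ((p.1 : Int), (p.2 : Int) + 1 - (p.1 : Int)))

-- ===== PRECONDITION & SPEC =====
def Spec_false_count (detection : List Bool) (out : List (Int × Int)) : Prop := out = false_count_alt detection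
instance (detection : List Bool) (out : List (Int × Int)) : Decidable (Spec_false_count detection out) := by unfold Spec_false_count; infer_instance

-- ===== CLAIM (what is proved, stated in full; the proofs are below) =====
def Claim_equal_false_count : Prop := ∀ (detection : List Bool), Dom_false_count detection → Spec_false_count detection (false_count detection)

-- ===== LEMMAS AND PROOFS =====

-- reference state machine: one element at a time; the state is the pending silent run
-- (start, length so far), `s` the absolute position
def runsGo : List Bool → Nat → Option (Nat × Nat) → List (Int × Int)
  | [], _, none => []
  | [], _, some (st, n) => [((st : Int), (n : Int))]
  | true :: xs, s, none => runsGo xs (s + 1) none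
  | true :: xs, s, some (st, n) => ((st : Int), (n : Int)) :: runsGo xs (s + 1) none
  | false :: xs, s, none => runsGo xs (s + 1) (some (s, 1))
  | false :: xs, s, some (st, n) => runsGo xs (s + 1) (some (st, n + 1))

-- a pending run absorbs exactly the leading `false`s and is then emitted
theorem runsGo_pending (xs : List Bool) : ∀ (s st n : Nat),
    runsGo xs s (some (st, n))
      = ((st : Int), ((n + (xs.takeWhile (· == false)).length : Nat) : Int)) ::
        runsGo (xs.drop (xs.takeWhile (· == false)).length) (s + (xs.takeWhile (· == false)).length) none := by
  induction xs with
  | nil => intro s st n; simp [runsGo]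
  | cons x xs ih =>
    intro s st n
    cases x with
    | true =>
      have ht : ((true :: xs).takeWhile (· == false)) = [] := by
        simp [List.takeWhile_cons]
      rw [ht]
      simp [runsGo]
    | false =>
      have ht : ((false :: xs).takeWhile (· == false))
          = false :: xs.takeWhile (· == false) := by
        simp [List.takeWhile_cons]
      rw [ht]
      have hL : runsGo (false :: xs) s (some (st, n)) = runsGo xs (s + 1) (some (st, n + 1)) := rfl
      rw [hL, ih (s + 1) st (n + 1)]
      simp only [List.length_cons, List.drop_succ_cons]
      have e1 : n + 1 + (xs.takeWhile (· == false)).length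
          = n + ((xs.takeWhile (· == false)).length + 1) := by omega
      have e2 : s + 1 + (xs.takeWhile (· == false)).length
          = s + ((xs.takeWhile (· == false)).length + 1) := by omega
      rw [e1, e2]

theorem fcInner_eq (d : List Bool) : ∀ (fuel j i : Nat), d.length - (i + j) ≤ fuel →
    fcInner d i j fuel = j + ((d.drop (i + j)).takeWhile (· == false)).length := by
  intro fuel
  induction fuel with
  | zero =>
    intro j i h
    have : d.length ≤ i + j := by omega
    simp [fcInner, List.drop_eq_nil_of_le this]
  | succ f ih =>
    intro j i h
    by_cases hlt : i + j < d.length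
    · have hget : d.getD (i + j) false = d[i + j] := List.getD_eq_getElem d false hlt
      rw [List.drop_eq_getElem_cons hlt]
      cases hx : d[i + j] with
      | false =>
        have : fcInner d i j (f + 1) = fcInner d i (j + 1) f := by
          simp [fcInner, hlt, hget, hx]
        rw [this, ih (j + 1) i (by omega)]
        have hij : i + (j + 1) = i + j + 1 := by omega
        rw [hij]
        simp
        omega
      | true =>
        have : fcInner d i j (f + 1) = j := by simp [fcInner, hlt, hget, hx]
        rw [this]
        simp
    · have : d.length ≤ i + j := by omega
      simp [fcInner, hlt, List.drop_eq_nil_of_le this]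

theorem fcLoop_eq (d : List Bool) : ∀ (fuel i : Nat) (acc : List (Int × Int)),
    d.length ≤ fuel + i → fcLoop d fuel i acc = acc ++ runsGo (d.drop i) i none := by
  intro fuel
  induction fuel with
  | zero =>
    intro i acc h
    have hle : d.length ≤ i := by omega
    simp [fcLoop, List.drop_eq_nil_of_le hle, runsGo]
  | succ f ih =>
    intro i acc h
    by_cases hlt : i < d.length
    · have hget : d.getD i false = d[i] := List.getD_eq_getElem d false hlt
      cases hx : d[i] with
      | true =>
        have hstep : fcLoop d (f + 1) i acc = fcLoop d f (i + 1) acc := by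
          simp [fcLoop, hlt, hget, hx]
        rw [hstep, ih (i + 1) acc (by omega), List.drop_eq_getElem_cons hlt, hx]
        simp [runsGo]
      | false =>
        have hdrop : d.drop i = false :: d.drop (i + 1) := by
          rw [List.drop_eq_getElem_cons hlt, hx]
        have hj : fcInner d i 0 d.length
            = 1 + ((d.drop (i + 1)).takeWhile (· == false)).length := by
          rw [fcInner_eq d d.length 0 i (by omega), Nat.add_zero, hdrop]
          simp <;> omega
        have hstep : fcLoop d (f + 1) i acc
            = fcLoop d f (i + fcInner d i 0 d.length)
                (acc ++ [((i : Int), ((fcInner d i 0 d.length : Nat) : Int))]) := by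
          simp [fcLoop, hlt, hget, hx]
        rw [hstep, ih _ _ (by rw [hj]; omega)]
        rw [hdrop]
        simp only [runsGo]
        rw [runsGo_pending (d.drop (i + 1)) (i + 1) i 1]
        rw [hj]
        have h1 : i + (1 + ((d.drop (i + 1)).takeWhile (· == false)).length)
            = i + 1 + ((d.drop (i + 1)).takeWhile (· == false)).length := by omega
        have h2 : d.drop (i + 1 + ((d.drop (i + 1)).takeWhile (· == false)).length)
            = (d.drop (i + 1)).drop ((d.drop (i + 1)).takeWhile (· == false)).length := by
          rw [List.drop_drop]
        rw [h1, h2]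
        simp
    · have hle : d.length ≤ i := by omega
      simp [fcLoop, hlt, List.drop_eq_nil_of_le hle, runsGo]

-- ---- B-side: recursive characterisations of the two boundary filters ----

-- run starts, relative indices; `prev` is the element before the list (True at the top)
def sRec (prev : Bool) : List Bool → List Nat
  | [] => []
  | x :: xs => (if !x && prev then [0] else []) ++ (sRec x xs).map (· + 1)

-- run ends, relative indices
def eRec : List Bool → List Nat
  | [] => []
  | x :: xs => (if !x && xs.headD true then [0] else []) ++ (eRec xs).map (· + 1)

theorem dropWhile_eq_drop_tw {α : Type} (p : α → Bool) (l : List α) :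
    l.dropWhile p = l.drop (l.takeWhile p).length := by
  have h2 : List.drop (l.takeWhile p).length (l.takeWhile p ++ l.dropWhile p) = l.dropWhile p :=
    List.drop_left
  rw [List.takeWhile_append_dropWhile] at h2
  exact h2.symm

theorem if_cons_help (c : Bool) (L : List Nat) :
    (if c = true then 0 :: L else L) = (if c then [0] else []) ++ L := by
  cases c <;> simp

-- the start filter computes sRec
theorem sFilter_eq (xs : List Bool) : ∀ (prev : Bool),
    (List.range xs.length).filter
      (fun i => !(xs.getD i false) && (if i = 0 then prev else xs.getD (i - 1) false))
    = sRec prev xs := by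
  induction xs with
  | nil => intro prev; simp [sRec]
  | cons x xs ih =>
    intro prev
    rw [List.length_cons, List.range_succ_eq_map, List.filter_cons, List.filter_map]
    have hpred : ((fun i => !((x :: xs).getD i false) &&
          (if i = 0 then prev else (x :: xs).getD (i - 1) false)) ∘ Nat.succ)
        = (fun i => !(xs.getD i false) && (if i = 0 then x else xs.getD (i - 1) false)) := by
      funext i
      cases i with
      | zero => simp [Function.comp, List.getD_cons_succ, List.getD_cons_zero]
      | succ k => simp [Function.comp, List.getD_cons_succ]
    rw [hpred, ih x]
    cases hx : (!x && prev) with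
    | true => simp [sRec, hx, List.getD_cons_zero, Nat.succ_eq_add_one]
    | false => simp [sRec, hx, List.getD_cons_zero, Nat.succ_eq_add_one]

-- the end filter computes eRec
theorem eFilter_eq (xs : List Bool) :
    (List.range xs.length).filter
      (fun i => !(xs.getD i false) && ((i == xs.length - 1) || xs.getD (i + 1) false))
    = eRec xs := by
  induction xs with
  | nil => simp [eRec]
  | cons x xs ih =>
    rw [List.length_cons, List.range_succ_eq_map, List.filter_cons, List.filter_map]
    have hpred : List.filter ((fun i => !((x :: xs).getD i false) &&
            ((i == xs.length + 1 - 1) || (x :: xs).getD (i + 1) false)) ∘ Nat.succ)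
          (List.range xs.length)
        = List.filter (fun i => !(xs.getD i false) &&
            ((i == xs.length - 1) || xs.getD (i + 1) false)) (List.range xs.length) := by
      apply List.filter_congr
      intro i hi
      have hilt : i < xs.length := List.mem_range.mp hi
      simp only [Function.comp_apply, List.getD_cons_succ, List.length_cons, Nat.add_sub_cancel,
        Nat.succ_eq_add_one]
      have h1 : (i + 1 == xs.length) = (i == xs.length - 1) := by
        rw [Bool.eq_iff_iff]; simp; omega
      rw [h1]
    rw [hpred, ih]
    have hhead : (!((x :: xs).getD 0 false) &&
          ((0 == xs.length + 1 - 1) || (x :: xs).getD (0 + 1) false))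
        = (!x && xs.headD true) := by
      cases xs <;> simp [List.getD]
    rw [hhead, if_cons_help,
      show (List.map Nat.succ (eRec xs)) = (eRec xs).map (· + 1) from by simp [Nat.succ_eq_add_one]]
    rfl

-- sRec with prev = false skips the leading false run
theorem sRec_false_run (ys : List Bool) :
    sRec false ys
      = (sRec true (ys.dropWhile (· == false))).map (· + (ys.takeWhile (· == false)).length) := by
  induction ys with
  | nil => simp [sRec]
  | cons y ys ih =>
    cases y with
    | true =>
      simp only [List.dropWhile_cons, List.takeWhile_cons]
      simp [sRec]
    | false =>
      have hL : sRec false (false :: ys) = (sRec false ys).map (· + 1) := by simp [sRec]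
      rw [hL, ih, List.map_map]
      simp only [List.dropWhile_cons, List.takeWhile_cons]
      simp only [show ((false : Bool) == false) = true from rfl, if_pos rfl, List.length_cons]
      apply List.map_congr_left
      intro a _
      simp [Function.comp]
      omega

-- eRec emits the end of the leading false run and recurses past it
theorem eRec_run (ys : List Bool) :
    eRec (false :: ys)
      = (ys.takeWhile (· == false)).length ::
        (eRec (ys.dropWhile (· == false))).map (· + ((ys.takeWhile (· == false)).length + 1)) := by
  induction ys with
  | nil => simp [eRec]
  | cons y ys ih =>
    cases y with
    | true =>
      simp only [List.dropWhile_cons, List.takeWhile_cons]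
      simp [eRec]
    | false =>
      have hL : eRec (false :: false :: ys) = (eRec (false :: ys)).map (· + 1) := by
        simp [eRec]
      rw [hL, ih]
      simp only [List.dropWhile_cons, List.takeWhile_cons]
      simp only [show ((false : Bool) == false) = true from rfl, if_pos rfl, List.length_cons,
        List.map_cons, List.map_map, List.cons.injEq]
      refine ⟨rfl, ?_⟩
      apply List.map_congr_left
      intro a _
      simp [Function.comp]
      omega

-- zipping starts with ends reproduces the state machine
theorem zip_eq_runsGo (xs : List Bool) (s : Nat) :
    ((sRec true xs).zip (eRec xs)).map
      (fun p => (((p.1 + s : Nat) : Int), (p.2 : Int) + 1 - (p.1 : Int)))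
    = runsGo xs s none := by
  match xs with
  | [] => simp [sRec, eRec, runsGo]
  | true :: ys =>
    have h := zip_eq_runsGo ys (s + 1)
    have hs : sRec true (true :: ys) = (sRec true ys).map (· + 1) := by simp [sRec]
    have he : eRec (true :: ys) = (eRec ys).map (· + 1) := by simp [eRec]
    rw [show runsGo (true :: ys) s none = runsGo ys (s + 1) none from rfl, ← h,
      hs, he, List.zip_map, List.map_map]
    apply List.map_congr_left
    intro p _
    simp only [Function.comp_apply, Prod.map_fst, Prod.map_snd, Prod.mk.injEq]
    refine ⟨by push_cast; omega, by push_cast; omega⟩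
  | false :: ys =>
    have tl := (ys.takeWhile (· == false)).length
    have h := zip_eq_runsGo (ys.dropWhile (· == false)) (s + 1 + (ys.takeWhile (· == false)).length)
    have hs : sRec true (false :: ys)
        = 0 :: (sRec true (ys.dropWhile (· == false))).map
            ((· + 1) ∘ (· + (ys.takeWhile (· == false)).length)) := by
      simp [sRec, sRec_false_run, List.map_map]
    have hR : runsGo (false :: ys) s none
        = ((s : Int), ((1 + (ys.takeWhile (· == false)).length : Nat) : Int)) ::
          runsGo (ys.dropWhile (· == false)) (s + 1 + (ys.takeWhile (· == false)).length) none := by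
      rw [show runsGo (false :: ys) s none = runsGo ys (s + 1) (some (s, 1)) from rfl,
        runsGo_pending ys (s + 1) s 1, dropWhile_eq_drop_tw]
    rw [hs, eRec_run ys, List.zip_cons_cons, List.map_cons, hR]
    simp only [List.cons.injEq, Prod.mk.injEq]
    refine ⟨⟨by push_cast; omega, by push_cast; omega⟩, ?_⟩
    rw [List.zip_map, List.map_map, ← h]
    apply List.map_congr_left
    intro p _
    simp only [Function.comp_apply, Prod.map_fst, Prod.map_snd, Prod.mk.injEq]
    refine ⟨by push_cast; omega, by push_cast; omega⟩
termination_by xs.length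
decreasing_by
  · simp
  · simp [Nat.lt_succ_iff]; exact List.length_dropWhile_le _ _

-- ===== VERDICT (by name: the statement is the Claim_ definition above) =====
theorem false_count_spec : Claim_equal_false_count := by
  intro d _
  unfold Spec_false_count false_count false_count_alt
  rw [fcLoop_eq d d.length 0 [] (by omega)]
  simp only [List.drop_zero, List.nil_append]
  have hs : (List.range d.length).filter
      (fun i => !(d.getD i false) && ((i == 0) || d.getD (i - 1) false)) = sRec true d := by
    rw [← sFilter_eq d true]
    apply List.filter_congr
    intro i _
    cases i <;> simp
  rw [show (List.range d.length).filter
      (fun i => !(d.getD i false) && ((i == d.length - 1) || d.getD (i + 1) false)) = eRec d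
    from eFilter_eq d]
  rw [hs, ← zip_eq_runsGo d 0]
  apply List.map_congr_left
  intro p _
  simp
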